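-- pv_equiv track=rewrite | github.com/gali1998/ExtendedIntroToCSHomework | 3/bar.py | bar_int_to_string
-- ===== SOURCE A (Python) =====
-- def bar_int_to_string(k, n):
--     assert 0 <= n <= 5 ** k - 1
--
--     dic = {0:'a', 1:'b', 2:'c', 3:'d', 4:'e'}
--     string = ''
--
--     while len(string)!= k:
--
--         string += dic[n % 5]
--
--         n = n//5
--
--     return string[::-1]
-- ===== SOURCE B (Python) =====
-- def bar_int_to_string(k, n):
--     assert 0 <= n <= 5 ** k - 1
--
--     dic = {0:'a', 1:'b', 2:'c', 3:'d', 4:'e'}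
--
--     if k == 0:
--         return ''
--
--     def conv(m):
--         return conv(m // 5) + dic[m % 5] if m >= 5 else dic[m]
--
--     s = conv(n)
--     return dic[0] * (k - len(s)) + s
-- ===== Notes on version B (the rewrite author's own statement) =====
-- stated objective: faster
-- what changed: B recursively converts n to its base-5 digit string most-significant-first and left-pads with 'a' to width k, instead of A's running-quotient loop that appends all k least-significant digit characters one by one and reverses the string.
import Mathlib
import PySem

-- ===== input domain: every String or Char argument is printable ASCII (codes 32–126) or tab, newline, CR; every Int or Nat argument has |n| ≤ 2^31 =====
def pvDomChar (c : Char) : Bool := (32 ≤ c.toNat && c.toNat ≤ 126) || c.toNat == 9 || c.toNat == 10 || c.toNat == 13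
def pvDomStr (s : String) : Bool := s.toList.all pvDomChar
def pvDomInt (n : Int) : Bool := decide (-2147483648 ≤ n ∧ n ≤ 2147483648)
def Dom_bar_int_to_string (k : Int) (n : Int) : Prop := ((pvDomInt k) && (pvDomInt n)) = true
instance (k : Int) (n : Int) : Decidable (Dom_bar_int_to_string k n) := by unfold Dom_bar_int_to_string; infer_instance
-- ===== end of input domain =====

-- B recursively converts n to its base-5 digit string most-significant-first and left-pads
-- with 'a' to width k; A collects all k least-significant digits and reverses. Objective: alternative.

-- ===== PORT A =====
-- dic = {0:'a', 1:'b', 2:'c', 3:'d', 4:'e'}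
def barDic : PySem.Dict Int Char := PySem.Dict.ofList [(0, 'a'), (1, 'b'), (2, 'c'), (3, 'd'), (4, 'e')]

-- 'while len(string) != k' of A; the string is its List Char (PySem strings live on List Char).
-- Fuel k.toNat+1 is exact under Pre_: length grows by 1 per iteration from 0 until it equals k.
-- dic[n % 5] always hits a key (0 ≤ n % 5 < 5), so getD's default is unreachable (Python never raises here).
def barLoopA (k : Int) : Nat → List Char → Int → List Char
  | 0, s, _ => s
  | fuel+1, s, n =>
    if (s.length : Int) = k then s
    else barLoopA k fuel (s ++ [PySem.Dict.getD barDic (PySem.Int.mod n 5) ' '])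
           (PySem.Int.floordiv n 5)

def bar_int_to_string (k : Int) (n : Int) : String :=
  -- the assert is captured by Pre_; string[::-1] is reversal
  String.ofList (barLoopA k (k.toNat + 1) [] n).reverse

-- ===== PORT B =====
-- B's inner conv(m): base-5 digits of m, most-significant-first; on the values B reaches
-- (m ≥ 0) dic[m] / dic[m % 5] always hit a key, so getD's default is unreachable
def barConv (m : Int) : List Char :=
  if _h : 5 ≤ m then
    barConv (PySem.Int.floordiv m 5) ++ [PySem.Dict.getD barDic (PySem.Int.mod m 5) ' ']
  else [PySem.Dict.getD barDic m ' ']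
termination_by m.toNat
decreasing_by
  have h5 : PySem.Int.floordiv m 5 = m / 5 := PySem.Int.floordiv_eq_ediv_of_pos (by norm_num)
  rw [h5]; omega

-- dic[0] * (k - len(s)) + s  (Python's str * negative count is empty — so is pyRepeat's)
def bar_int_to_string_alt (k : Int) (n : Int) : String :=
  if k = 0 then ""
  else
    let s := barConv n
    String.ofList (PySem.List.pyRepeat [PySem.Dict.getD barDic 0 ' '] (k - s.length) ++ s)

-- ===== PRECONDITION & SPEC =====
-- Pre_ excludes exactly the inputs on which A's assert '0 <= n <= 5**k - 1' raises AssertionError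
-- (for k < 0, Python's 5**k is a fraction < 1, so the assert fails for every n). On Dom the
-- condition below IS that assert: when k ≥ 14, every 0 ≤ n ≤ 2^31 already satisfies n < 5^14 ≤ 5^k,
-- so the '14 ≤ k' disjunct admits precisely the inputs the assert accepts without computing 5^k
-- for k as large as 2^31; no input of Dom on which A returns is excluded.
def Pre_bar_int_to_string (k : Int) (n : Int) : Prop :=
  0 ≤ k ∧ 0 ≤ n ∧ (n < (5:Int) ^ (min k.toNat 14) ∨ 14 ≤ k)
instance (k : Int) (n : Int) : Decidable (Pre_bar_int_to_string k n) := by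
  unfold Pre_bar_int_to_string; infer_instance

def pvWitness_bar_int_to_string : Int × Int := (3, 37)

def Spec_bar_int_to_string (k : Int) (n : Int) (out : String) : Prop := out = bar_int_to_string_alt k n
instance (k : Int) (n : Int) (out : String) : Decidable (Spec_bar_int_to_string k n out) := by
  unfold Spec_bar_int_to_string; infer_instance

-- ===== CLAIM (what is proved, stated in full; the proofs are below) =====
def Claim_equal_bar_int_to_string : Prop := ∀ (k : Int) (n : Int), Dom_bar_int_to_string k n → Pre_bar_int_to_string k n → Spec_bar_int_to_string k n (bar_int_to_string k n)

-- ===== LEMMAS AND PROOFS =====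

-- the digit → letter map, on Nat digits
def digitN (d : Nat) : Char :=
  if d = 0 then 'a' else if d = 1 then 'b' else if d = 2 then 'c' else if d = 3 then 'd' else 'e'

-- least-significant-first digit characters (A's loop body, on Nat)
def lsbN : Nat → Nat → List Char
  | 0, _ => []
  | m+1, t => digitN (t % 5) :: lsbN m (t / 5)

-- most-significant-first digit characters (B's loop body, on Nat)
def msbN : Nat → Nat → List Char
  | 0, _ => []
  | m+1, t => digitN (t / 5 ^ m % 5) :: msbN m t

theorem dic_getD (d : Nat) (hd : d < 5) : PySem.Dict.getD barDic (d : Int) ' ' = digitN d := by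
  interval_cases d <;> decide

theorem mod5 (t : Nat) : PySem.Int.mod (t : Int) 5 = ((t % 5 : Nat) : Int) := by
  exact_mod_cast PySem.Int.mod_natCast t 5

theorem loopA_spec (m : Nat) : ∀ (t : Nat) (s : List Char),
    barLoopA (((s.length + m : Nat) : Int)) (m + 1) s (t : Int) = s ++ lsbN m t := by
  induction m with
  | zero => intro t s; simp [barLoopA, lsbN]
  | succ m ih =>
    intro t s
    rw [barLoopA]
    rw [if_neg (by push_cast; omega)]
    have hchar : PySem.Dict.getD barDic (PySem.Int.mod (t : Int) 5) ' ' = digitN (t % 5) := by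
      rw [mod5]; exact dic_getD _ (Nat.mod_lt _ (by omega))
    have hdiv : PySem.Int.floordiv (t : Int) 5 = ((t / 5 : Nat) : Int) := by
      exact_mod_cast PySem.Int.floordiv_natCast t 5
    rw [hchar, hdiv]
    have hk : ((s.length + (m + 1) : Nat) : Int) = (((s ++ [digitN (t % 5)]).length + m : Nat) : Int) := by
      simp; omega
    rw [hk, ih (t / 5) (s ++ [digitN (t % 5)])]
    simp [lsbN]

theorem msb_snoc (m : Nat) : ∀ (t : Nat), msbN (m + 1) t = msbN m (t / 5) ++ [digitN (t % 5)] := by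
  induction m with
  | zero => intro t; simp [msbN]
  | succ m ih =>
    intro t
    have hdd : t / 5 / 5 ^ m = t / 5 ^ (m + 1) := by
      rw [Nat.div_div_eq_div_mul, ← pow_succ']
    calc msbN (m + 2) t = digitN (t / 5 ^ (m + 1) % 5) :: msbN (m + 1) t := rfl
      _ = digitN (t / 5 ^ (m + 1) % 5) :: (msbN m (t / 5) ++ [digitN (t % 5)]) := by rw [ih t]
      _ = (digitN (t / 5 / 5 ^ m % 5) :: msbN m (t / 5)) ++ [digitN (t % 5)] := by rw [hdd]; simp
      _ = msbN (m + 1) (t / 5) ++ [digitN (t % 5)] := rfl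

theorem rev_lsb (m : Nat) : ∀ (t : Nat), (lsbN m t).reverse = msbN m t := by
  induction m with
  | zero => intro t; rfl
  | succ m ih =>
    intro t
    show (digitN (t % 5) :: lsbN m (t / 5)).reverse = _
    rw [List.reverse_cons, ih (t / 5), ← msb_snoc]


-- Nat-level version of B's conv
def convN (t : Nat) : List Char :=
  if _h : 5 ≤ t then convN (t / 5) ++ [digitN (t % 5)] else [digitN t]
termination_by t
decreasing_by exact Nat.div_lt_self (by omega) (by omega)

theorem conv_int (t : Nat) : barConv (t : Int) = convN t := by
  induction t using Nat.strong_induction_on with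
  | _ t ih =>
    rw [barConv, convN]
    by_cases h : 5 ≤ t
    · rw [dif_pos (by exact_mod_cast h), dif_pos h]
      have hdiv : PySem.Int.floordiv (t : Int) 5 = ((t / 5 : Nat) : Int) := by
        exact_mod_cast PySem.Int.floordiv_natCast t 5
      rw [hdiv, ih (t / 5) (Nat.div_lt_self (by omega) (by omega)), mod5,
        dic_getD _ (Nat.mod_lt _ (by omega))]
    · rw [dif_neg (by exact_mod_cast h), dif_neg h, dic_getD t (by omega)]

theorem convN_len (t : Nat) :
    (convN t).length = if 5 ≤ t then (convN (t / 5)).length + 1 else 1 := by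
  rw [convN]; split_ifs <;> · simp

theorem convN_lt (t : Nat) : t < 5 ^ (convN t).length := by
  induction t using Nat.strong_induction_on with
  | _ t ih =>
    rw [convN_len]
    split_ifs with h
    · have := ih (t / 5) (Nat.div_lt_self (by omega) (by omega))
      have h5 : 5 ^ ((convN (t / 5)).length + 1) = 5 * 5 ^ (convN (t / 5)).length := by
        rw [pow_succ]; ring
      omega
    · simpa using h

theorem convN_le (t : Nat) : ∀ (k : Nat), t < 5 ^ k → 1 ≤ k → (convN t).length ≤ k := by
  induction t using Nat.strong_induction_on with
  | _ t ih =>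
    intro k hk h1
    rw [convN_len]
    split_ifs with h
    · have hk2 : 2 ≤ k := by
        rcases Nat.lt_or_ge k 2 with hc | hc
        · have hk1 : k = 1 := by omega
          subst hk1
          simp at hk
          omega
        · exact hc
      have hdiv : t / 5 < 5 ^ (k - 1) := by
        apply Nat.div_lt_of_lt_mul
        have : 5 ^ (k - 1) * 5 = 5 ^ k := by
          rw [← pow_succ]; congr 1; omega
        omega
      have := ih (t / 5) (Nat.div_lt_self (by omega) (by omega)) (k - 1) hdiv (by omega)
      omega
    · omega

theorem convN_msb (t : Nat) : convN t = msbN (convN t).length t := by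
  induction t using Nat.strong_induction_on with
  | _ t ih =>
    by_cases h : 5 ≤ t
    · have he : convN t = convN (t / 5) ++ [digitN (t % 5)] := by rw [convN, dif_pos h]
      have hl : (convN t).length = (convN (t / 5)).length + 1 := by
        rw [convN_len, if_pos h]
      rw [hl, he, msb_snoc, ← ih (t / 5) (Nat.div_lt_self (by omega) (by omega))]
    · have he : convN t = [digitN t] := by rw [convN, dif_neg h]
      have hl : (convN t).length = 1 := by rw [convN_len, if_neg h]
      rw [hl, he]
      show _ = [digitN (t / 5 ^ 0 % 5)]
      rw [pow_zero, Nat.div_one, Nat.mod_eq_of_lt (by omega)]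

theorem msbN_pad (j : Nat) : ∀ (k t : Nat), j ≤ k → t < 5 ^ j →
    msbN k t = List.replicate (k - j) 'a' ++ msbN j t := by
  intro k
  induction k with
  | zero => intro t hj _; interval_cases j; simp
  | succ k ihk =>
    intro t hj ht
    by_cases hje : j = k + 1
    · subst hje; simp
    · have hjk : j ≤ k := by omega
      have ht5 : t < 5 ^ k := lt_of_lt_of_le ht (Nat.pow_le_pow_right (by omega) hjk)
      have hz : t / 5 ^ k = 0 := Nat.div_eq_of_lt ht5
      show digitN (t / 5 ^ k % 5) :: msbN k t = _
      rw [hz, ihk t hjk ht]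
      have : k + 1 - j = (k - j) + 1 := by omega
      rw [this, List.replicate_succ]
      rfl

-- ===== VERDICT (by name: the statement is the Claim_ definition above) =====
theorem bar_int_to_string_spec : Claim_equal_bar_int_to_string := by
  intro k n hdom hpre
  obtain ⟨hk, hn, hb⟩ := hpre
  obtain ⟨m, rfl⟩ : ∃ m : Nat, k = (m : Int) := ⟨k.toNat, (Int.toNat_of_nonneg hk).symm⟩
  obtain ⟨t, rfl⟩ : ∃ t : Nat, n = (t : Int) := ⟨n.toNat, (Int.toNat_of_nonneg hn).symm⟩
  have hdn : (t : Int) ≤ 2147483648 := by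
    unfold Dom_bar_int_to_string pvDomInt at hdom
    simp only [Bool.and_eq_true, decide_eq_true_eq] at hdom
    exact hdom.2.2
  have htm : t < 5 ^ m := by
    rcases hb with h1 | h14
    · have h1' : t < 5 ^ min m 14 := by
        rw [Int.toNat_natCast] at h1; exact_mod_cast h1
      exact lt_of_lt_of_le h1' (Nat.pow_le_pow_right (by omega) (Nat.min_le_left m 14))
    · have hm14 : 14 ≤ m := by exact_mod_cast h14
      have ht14 : t < 5 ^ 14 := by
        have : t ≤ 2147483648 := by exact_mod_cast hdn
        calc t ≤ 2147483648 := this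
          _ < 5 ^ 14 := by norm_num
      exact lt_of_lt_of_le ht14 (Nat.pow_le_pow_right (by omega) hm14)
  unfold Spec_bar_int_to_string
  have hA : bar_int_to_string (m : Int) (t : Int) = String.ofList (msbN m t) := by
    unfold bar_int_to_string
    have h := loopA_spec m t []
    simp only [List.nil_append, List.length_nil, Nat.zero_add] at h
    rw [Int.toNat_natCast, h, rev_lsb]
  rw [hA]
  rcases Nat.eq_zero_or_pos m with hm | hm
  · subst hm
    rw [bar_int_to_string_alt]
    simp only [Nat.cast_zero]
    rfl
  · rw [bar_int_to_string_alt, if_neg (by exact_mod_cast Nat.pos_iff_ne_zero.mp hm)]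
    simp only [conv_int]
    have hL : (convN t).length ≤ m := convN_le t m htm hm
    have hd : barDic.getD 0 ' ' = 'a' := by decide
    rw [PySem.List.pyRepeat_singleton, hd]
    have hcnt : (((m : Int)) - ((convN t).length : Int)).toNat = m - (convN t).length := by
      omega
    rw [hcnt]
    rw [msbN_pad (convN t).length m t hL (convN_lt t), ← convN_msb]
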